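-- pv_equiv track=rewrite | github.com/opethe1st/CompetitiveProgramming | CodeChef/2018/02/FebruaryChallenge/chefptnt.py | solution
-- ===== SOURCE A (Python) =====
-- def solution(N, M, X, K, S):
--     months_left = M
--     patents_left = N
--     parity = 1
--     available_workers = [S.count('O'), S.count('E')]
--     while months_left and patents_left:
--         months_left -= 1
--         parity = 1 - parity
--         patents_done = min(available_workers[parity], X)
--         available_workers[parity] -= patents_done
--         patents_left -= patents_done
--     if patents_left <= 0:
--         return "yes"
--     else:
--         return "no"
-- ===== SOURCE B (Python) =====
-- def solution(N, M, X, K, S):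
--     # Nothing to produce: the target is already met.
--     if N <= 0:
--         return "yes"
--     # Closed form: odd-numbered months (1st, 3rd, ...) draw on the 'O' pool,
--     # even-numbered months on the 'E' pool; a pool of w workers used over m
--     # months at X patents per month yields min(w, m*X) patents in total.
--     m0 = (M + 1) // 2
--     m1 = M // 2
--     total = min(S.count('O'), m0 * X) + min(S.count('E'), m1 * X)
--     return "yes" if N <= total else "no"
-- ===== Notes on version B (the rewrite author's own statement) =====
-- stated objective: faster
-- what changed: B replaces A's month-by-month while-loop simulation of the two alternating worker pools with an early 'yes' for non-positive targets plus the closed-form total min(countO, ceil(M/2)*X) + min(countE, floor(M/2)*X), dropping the O(M) loop entirely.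
-- intended difference: On inputs with N < 0 and X < 0 where the loop's final running total N - M*X stays positive (M*X < N and X does not divide N), A answers "no" even though zero or fewer patents are required; B answers "yes", the intended value since the target is already met before any work. — e.g. on solution(-1, 1, -2, 0, ""): A returns "no", B returns "yes"
-- outside the precondition, e.g. on solution(1, -1, 1, 0, 'O'): A returns 'yes', B returns 'no'
import Mathlib
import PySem

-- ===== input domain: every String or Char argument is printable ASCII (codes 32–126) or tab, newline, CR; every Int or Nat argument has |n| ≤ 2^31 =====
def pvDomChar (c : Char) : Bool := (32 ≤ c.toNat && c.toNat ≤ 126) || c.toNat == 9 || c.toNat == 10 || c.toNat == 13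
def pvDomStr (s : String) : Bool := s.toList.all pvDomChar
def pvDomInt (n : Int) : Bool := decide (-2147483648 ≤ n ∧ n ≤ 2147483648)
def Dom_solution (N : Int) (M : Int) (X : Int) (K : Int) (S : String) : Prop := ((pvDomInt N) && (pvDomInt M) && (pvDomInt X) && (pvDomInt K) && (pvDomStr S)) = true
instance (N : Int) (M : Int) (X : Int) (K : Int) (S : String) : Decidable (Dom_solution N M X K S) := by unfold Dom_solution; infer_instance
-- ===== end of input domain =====

-- B replaces A's month-by-month simulation with an early 'yes' for non-positive targets plus a closed-form pool total (O(|S|) instead of O(M + |S|)).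

-- ===== PORT A =====
-- the while loop: fuel = months_left (A only returns for M ≥ 0, see Pre_); state =
-- (patents_left, parity, available_workers[0], available_workers[1])
def solutionLoop (X : Int) : Nat → Int → Int → Int → Int → Int
  | 0, patents_left, _, _, _ => patents_left
  | f + 1, patents_left, parity, w0, w1 =>
    if patents_left ≠ 0 then
      let parity' := 1 - parity
      let avail := if parity' = 0 then w0 else w1
      let patents_done := min avail X
      solutionLoop X f (patents_left - patents_done) parity'
        (if parity' = 0 then w0 - patents_done else w0)
        (if parity' = 0 then w1 else w1 - patents_done)
    else patents_left

def solution (N : Int) (M : Int) (X : Int) (K : Int) (S : String) : String :=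
  let w0 : Int := (PySem.Str.count S "O" : Int)
  let w1 : Int := (PySem.Str.count S "E" : Int)
  let patents_left := solutionLoop X M.toNat N 1 w0 w1
  if patents_left ≤ 0 then "yes" else "no"

-- ===== PORT B =====
def solution_alt (N : Int) (M : Int) (X : Int) (K : Int) (S : String) : String :=
  if N ≤ 0 then "yes"
  else
    let m0 := PySem.Int.floordiv (M + 1) 2
    let m1 := PySem.Int.floordiv M 2
    let total := min ((PySem.Str.count S "O" : Int)) (m0 * X)
               + min ((PySem.Str.count S "E" : Int)) (m1 * X)
    if N ≤ total then "yes" else "no"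

-- ===== PRECONDITION & SPEC =====
-- Pre_ excludes M < 0, where A's while-loop condition `months_left` never reaches 0 and A
-- diverges unless patents_left happens to hit exactly zero (then A still returns a value B need not match).
def Pre_solution (N : Int) (M : Int) (X : Int) (K : Int) (S : String) : Prop := 0 ≤ M
instance (N : Int) (M : Int) (X : Int) (K : Int) (S : String) : Decidable (Pre_solution N M X K S) := by unfold Pre_solution; infer_instance
def pvWitness_solution : Int × Int × Int × Int × String := (3, 4, 2, 0, "OOEE")

-- On inputs with N < 0 and X < 0 where the loop's final running total N - M*X stays positive
-- (M*X < N and X does not divide N), A answers "no" even though zero or fewer patents are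
-- required; B answers "yes", the intended value since the target is already met before any work.
def D_solution (N : Int) (M : Int) (X : Int) (K : Int) (S : String) : Prop :=
  N < 0 ∧ X < 0 ∧ M * X < N ∧ ¬ (X ∣ N)
instance (N : Int) (M : Int) (X : Int) (K : Int) (S : String) : Decidable (D_solution N M X K S) := by unfold D_solution; infer_instance

def Spec_solution (N : Int) (M : Int) (X : Int) (K : Int) (S : String) (out : String) : Prop := ¬ D_solution N M X K S → out = solution_alt N M X K S
instance (N : Int) (M : Int) (X : Int) (K : Int) (S : String) (out : String) : Decidable (Spec_solution N M X K S out) := by unfold Spec_solution; infer_instance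

def pvDiffWitness_solution : Int × Int × Int × Int × String := (-1, 1, -2, 0, "")
def pvDiffWitnessOut_solution : String × String := ("no", "yes")

-- ===== CLAIM (what is proved, stated in full; the proofs are below) =====
def Claim_unchanged_solution : Prop := ∀ (N : Int) (M : Int) (X : Int) (K : Int) (S : String), Dom_solution N M X K S → Pre_solution N M X K S → Spec_solution N M X K S (solution N M X K S)
def Claim_changed_solution : Prop := Dom_solution (pvDiffWitness_solution.1) (pvDiffWitness_solution.2.1) (pvDiffWitness_solution.2.2.1) (pvDiffWitness_solution.2.2.2.1) (pvDiffWitness_solution.2.2.2.2) ∧ Pre_solution (pvDiffWitness_solution.1) (pvDiffWitness_solution.2.1) (pvDiffWitness_solution.2.2.1) (pvDiffWitness_solution.2.2.2.1) (pvDiffWitness_solution.2.2.2.2) ∧ D_solution (pvDiffWitness_solution.1) (pvDiffWitness_solution.2.1) (pvDiffWitness_solution.2.2.1) (pvDiffWitness_solution.2.2.2.1) (pvDiffWitness_solution.2.2.2.2) ∧ solution (pvDiffWitness_solution.1) (pvDiffWitness_solution.2.1) (pvDiffWitness_solution.2.2.1) (pvDiffWitness_solution.2.2.2.1) (pvDiffWitness_solution.2.2.2.2)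 = pvDiffWitnessOut_solution.1 ∧ solution_alt (pvDiffWitness_solution.1) (pvDiffWitness_solution.2.1) (pvDiffWitness_solution.2.2.1) (pvDiffWitness_solution.2.2.2.1) (pvDiffWitness_solution.2.2.2.2) = pvDiffWitnessOut_solution.2 ∧ pvDiffWitnessOut_solution.1 ≠ pvDiffWitnessOut_solution.2
def Claim_exact_solution : Prop := ∀ (N : Int) (M : Int) (X : Int) (K : Int) (S : String), Dom_solution N M X K S → Pre_solution N M X K S → D_solution N M X K S → solution N M X K S ≠ solution_alt N M X K S

-- ===== LEMMAS AND PROOFS =====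

-- months allotted to pool 0 ('O') resp. pool 1 ('E') in the next f iterations, given the
-- current value of A's parity variable
def poolMonths0 (f : Nat) (p : Int) : Nat := if p = 1 then (f + 1) / 2 else f / 2
def poolMonths1 (f : Nat) (p : Int) : Nat := if p = 1 then f / 2 else (f + 1) / 2

lemma min_split (w X c : Int) (hw : 0 ≤ w) (hX : 0 ≤ X) (hc : 0 ≤ c) :
    min w ((c + 1) * X) = min w X + min (w - min w X) (c * X) := by
  have hcx : 0 ≤ c * X := mul_nonneg hc hX
  have h : (c + 1) * X = c * X + X := by ring
  rw [h]; omega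

-- A's loop result is ≤ 0 iff the target fits the closed-form pool totals (nonnegative X)
lemma loop_le_iff (X : Int) (hX : 0 ≤ X) :
    ∀ (f : Nat) (pl w0 w1 p : Int), 0 ≤ w0 → 0 ≤ w1 → (p = 0 ∨ p = 1) →
      (solutionLoop X f pl p w0 w1 ≤ 0 ↔
        pl ≤ min w0 ((poolMonths0 f p : Int) * X) + min w1 ((poolMonths1 f p : Int) * X)) := by
  intro f
  induction f with
  | zero =>
    intro pl w0 w1 p h0 h1 hp
    have e0 : poolMonths0 0 p = 0 := by unfold poolMonths0; split <;> rfl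
    have e1 : poolMonths1 0 p = 0 := by unfold poolMonths1; split <;> rfl
    simp [solutionLoop, e0, e1]; omega
  | succ f ih =>
    intro pl w0 w1 p h0 h1 hp
    by_cases hpl : pl = 0
    · subst hpl
      have t0 : 0 ≤ (poolMonths0 (f + 1) p : Int) * X := mul_nonneg (by positivity) hX
      have t1 : 0 ≤ (poolMonths1 (f + 1) p : Int) * X := mul_nonneg (by positivity) hX
      simp [solutionLoop]; omega
    · rcases hp with hp | hp
      · -- parity = 0, next month uses pool 1
        subst hp
        have hstep : solutionLoop X (f + 1) pl 0 w0 w1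
            = solutionLoop X f (pl - min w1 X) 1 w0 (w1 - min w1 X) := by
          simp [solutionLoop, hpl]
        rw [hstep, ih (pl - min w1 X) w0 (w1 - min w1 X) 1 h0 (by omega) (Or.inr rfl)]
        have e0 : poolMonths0 (f + 1) 0 = poolMonths0 f 1 := by
          unfold poolMonths0; simp
        have e1 : (poolMonths1 (f + 1) 0 : Int) = (poolMonths1 f 1 : Int) + 1 := by
          unfold poolMonths1; simp; omega
        rw [e0, e1, min_split w1 X (poolMonths1 f 1 : Int) h1 hX (by positivity)]
        omega
      · -- parity = 1, next month uses pool 0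
        subst hp
        have hstep : solutionLoop X (f + 1) pl 1 w0 w1
            = solutionLoop X f (pl - min w0 X) 0 (w0 - min w0 X) w1 := by
          simp [solutionLoop, hpl]
        rw [hstep, ih (pl - min w0 X) (w0 - min w0 X) w1 0 (by omega) h1 (Or.inl rfl)]
        have e1 : poolMonths1 (f + 1) 1 = poolMonths1 f 0 := by
          unfold poolMonths1; simp
        have e0 : (poolMonths0 (f + 1) 1 : Int) = (poolMonths0 f 0 : Int) + 1 := by
          unfold poolMonths0; simp; omega
        rw [e1, e0, min_split w0 X (poolMonths0 f 0 : Int) h0 hX (by positivity)]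
        omega

-- negative X, the target never lands exactly on 0: the loop runs all f months, X each month
lemma loop_neg_run (X : Int) (hX : X < 0) :
    ∀ (f : Nat) (pl w0 w1 p : Int), 0 ≤ w0 → 0 ≤ w1 →
      (∀ k : Nat, k < f → pl ≠ (k : Int) * X) →
      solutionLoop X f pl p w0 w1 = pl - (f : Int) * X := by
  intro f
  induction f with
  | zero => intro pl w0 w1 p _ _ _; simp [solutionLoop]
  | succ f ih =>
    intro pl w0 w1 p h0 h1 hk
    have hpl : pl ≠ 0 := by
      have := hk 0 (by omega); simpa using this
    have havail : min (if 1 - p = 0 then w0 else w1) X = X := by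
      split <;> omega
    have hstep : solutionLoop X (f + 1) pl p w0 w1
        = solutionLoop X f (pl - X) (1 - p)
            (if 1 - p = 0 then w0 - X else w0)
            (if 1 - p = 0 then w1 else w1 - X) := by
      simp only [solutionLoop, hpl, ne_eq, not_false_eq_true, if_pos, havail]
    rw [hstep, ih (pl - X) _ _ (1 - p) (by split <;> omega) (by split <;> omega)
      (by intro k hkf hEq
          exact hk (k + 1) (by omega) (by push_cast; linarith [hEq]))]
    push_cast; ring

lemma count_nonneg (S sub : String) : (0 : Int) ≤ (PySem.Str.count S sub : Int) := by positivity

-- the loop reaches 0 exactly, after k ≤ f months of X each (negative X)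
lemma loop_neg_hit (X : Int) (hX : X < 0) :
    ∀ (k f : Nat) (p w0 w1 : Int), 0 ≤ w0 → 0 ≤ w1 → k ≤ f →
      solutionLoop X f ((k : Int) * X) p w0 w1 ≤ 0 := by
  intro k
  induction k with
  | zero =>
    intro f p w0 w1 _ _ _
    cases f with
    | zero => simp [solutionLoop]
    | succ f => simp [solutionLoop]
  | succ k ih =>
    intro f p w0 w1 h0 h1 hkf
    cases f with
    | zero => omega
    | succ f =>
      have hpl : ((k : Int) + 1) * X ≠ 0 := by nlinarith [Int.natCast_nonneg k]
      have havail : min (if 1 - p = 0 then w0 else w1) X = X := by split <;> omega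
      have hstep : solutionLoop X (f + 1) (((k : Nat) + 1 : Int) * X) p w0 w1
          = solutionLoop X f ((((k : Nat) + 1 : Int)) * X - X) (1 - p)
              (if 1 - p = 0 then w0 - X else w0)
              (if 1 - p = 0 then w1 else w1 - X) := by
        simp only [solutionLoop, hpl, ne_eq, not_false_eq_true, if_pos, havail]
      have harg : (((k : Nat) + 1 : Int)) * X - X = (k : Int) * X := by ring
      have := ih f (1 - p) (if 1 - p = 0 then w0 - X else w0) (if 1 - p = 0 then w1 else w1 - X)
        (by split <;> omega) (by split <;> omega) (by omega)
      push_cast at hstep ⊢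
      rw [hstep, harg]
      exact this

-- the ports, with their lets spelled out (definitional)
lemma solution_eq (N M X K : Int) (S : String) :
    solution N M X K S
      = (if solutionLoop X M.toNat N 1 ((PySem.Str.count S "O" : Nat) : Int)
            ((PySem.Str.count S "E" : Nat) : Int) ≤ 0 then "yes" else "no") := rfl

lemma solution_alt_eq (N M X K : Int) (S : String) :
    solution_alt N M X K S
      = (if N ≤ 0 then "yes" else
          if N ≤ min ((PySem.Str.count S "O" : Nat) : Int) (PySem.Int.floordiv (M + 1) 2 * X)
               + min ((PySem.Str.count S "E" : Nat) : Int) (PySem.Int.floordiv M 2 * X)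
          then "yes" else "no") := rfl

-- B's floor divisions are the loop's month counts
lemma m0_eq (M : Int) (hM : 0 ≤ M) :
    PySem.Int.floordiv (M + 1) 2 = ((poolMonths0 M.toNat 1 : Nat) : Int) := by
  have h1 : PySem.Int.floordiv (M + 1) 2 = (M + 1).fdiv 2 := rfl
  have h2 : poolMonths0 M.toNat 1 = (M.toNat + 1) / 2 := by unfold poolMonths0; simp
  rw [h1, h2, Int.fdiv_eq_ediv_of_nonneg] <;> omega

lemma m1_eq (M : Int) (hM : 0 ≤ M) :
    PySem.Int.floordiv M 2 = ((poolMonths1 M.toNat 1 : Nat) : Int) := by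
  have h1 : PySem.Int.floordiv M 2 = M.fdiv 2 := rfl
  have h2 : poolMonths1 M.toNat 1 = M.toNat / 2 := by unfold poolMonths1; simp
  rw [h1, h2, Int.fdiv_eq_ediv_of_nonneg] <;> omega

lemma poolMonths_sum (M : Int) (hM : 0 ≤ M) :
    ((poolMonths0 M.toNat 1 : Nat) : Int) + ((poolMonths1 M.toNat 1 : Nat) : Int) = M := by
  unfold poolMonths0 poolMonths1; simp; omega

-- ===== VERDICT (by name: the statement is the Claim_ definition above) =====
theorem solution_spec : Claim_unchanged_solution := by
  intro N M X K S _ hpre hnd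
  unfold Pre_solution at hpre
  unfold D_solution at hnd
  show solution N M X K S = solution_alt N M X K S
  rw [solution_eq, solution_alt_eq, m0_eq M hpre, m1_eq M hpre]
  have h0 : (0 : Int) ≤ ((PySem.Str.count S "O" : Nat) : Int) := count_nonneg S "O"
  have h1 : (0 : Int) ≤ ((PySem.Str.count S "E" : Nat) : Int) := count_nonneg S "E"
  rcases le_or_gt 0 X with hX | hX
  · -- nonnegative X: both sides test N against the closed-form total
    have hiff := loop_le_iff X hX M.toNat N _ _ 1 h0 h1 (Or.inr rfl)
    have t0 : 0 ≤ min ((PySem.Str.count S "O" : Nat) : Int) (((poolMonths0 M.toNat 1 : Nat) : Int) * X) :=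
      le_min h0 (mul_nonneg (by positivity) hX)
    have t1 : 0 ≤ min ((PySem.Str.count S "E" : Nat) : Int) (((poolMonths1 M.toNat 1 : Nat) : Int) * X) :=
      le_min h1 (mul_nonneg (by positivity) hX)
    by_cases hN : N ≤ 0
    · rw [if_pos hN, if_pos (hiff.mpr (by omega))]
    · rw [if_neg hN]
      split_ifs with hA hB hB
      · rfl
      · exact absurd (hiff.mp hA) hB
      · exact absurd (hiff.mpr hB) hA
      · rfl
  · -- negative X
    have hm0 : ((poolMonths0 M.toNat 1 : Nat) : Int) * X ≤ 0 :=
      mul_nonpos_of_nonneg_of_nonpos (by positivity) (by omega)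
    have hm1 : ((poolMonths1 M.toNat 1 : Nat) : Int) * X ≤ 0 :=
      mul_nonpos_of_nonneg_of_nonpos (by positivity) (by omega)
    have htot : min ((PySem.Str.count S "O" : Nat) : Int) (((poolMonths0 M.toNat 1 : Nat) : Int) * X)
          + min ((PySem.Str.count S "E" : Nat) : Int) (((poolMonths1 M.toNat 1 : Nat) : Int) * X)
        = M * X := by
      rw [min_eq_right (by omega), min_eq_right (by omega), ← add_mul, poolMonths_sum M hpre]
    rw [htot]
    rcases lt_trichotomy N 0 with hN | hN | hN
    · -- N < 0: outside D_, so N ≤ M*X or X ∣ N; A answers "yes" either way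
      rw [if_pos (le_of_lt hN)]
      have hyes : solutionLoop X M.toNat N 1 ((PySem.Str.count S "O" : Nat) : Int)
          ((PySem.Str.count S "E" : Nat) : Int) ≤ 0 := by
        by_cases hdvd : X ∣ N
        · -- exact hit at k = N/X (if within M months) or full run below zero
          obtain ⟨q, hq⟩ := hdvd
          have hq0 : 0 < q := by nlinarith
          by_cases hqM : q ≤ M
          · have hqn : ((q.toNat : Nat) : Int) = q := Int.toNat_of_nonneg (by omega)
            have := loop_neg_hit X hX q.toNat M.toNat 1 _ _ h0 h1 (by omega)
            rw [hqn] at this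
            rw [hq, mul_comm]
            exact this
          · have hnohit : ∀ k : Nat, k < M.toNat → N ≠ (k : Int) * X := by
              intro k hk hEq
              have : (k : Int) = q := by
                have : X * q = (k : Int) * X := by rw [← hq]; exact hEq
                nlinarith
              omega
            rw [loop_neg_run X hX M.toNat N _ _ 1 h0 h1 hnohit]
            have hMc : ((M.toNat : Nat) : Int) = M := by omega
            have : X * q ≤ X * (M + 1) := by
              apply mul_le_mul_of_nonpos_left (by omega) (le_of_lt hX)
            rw [hMc]
            nlinarith [hq]
        · -- X ∤ N: outside D_ forces N ≤ M*X; full run ends ≤ 0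
          have hle : N ≤ M * X := by
            by_contra hgt
            exact hnd ⟨hN, hX, by omega, hdvd⟩
          have hnohit : ∀ k : Nat, k < M.toNat → N ≠ (k : Int) * X := by
            intro k _ hEq
            exact hdvd ⟨k, by linarith [hEq, mul_comm (k : Int) X]⟩
          rw [loop_neg_run X hX M.toNat N _ _ 1 h0 h1 hnohit]
          have hMc : ((M.toNat : Nat) : Int) = M := by omega
          rw [hMc]; omega
      rw [if_pos hyes]
    · -- N = 0: loop returns 0 immediately, both "yes"
      subst hN
      have hz : ∀ f : Nat, solutionLoop X f 0 1 ((PySem.Str.count S "O" : Nat) : Int)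
          ((PySem.Str.count S "E" : Nat) : Int) ≤ 0 := by
        intro f; cases f with
        | zero => simp [solutionLoop]
        | succ f => simp [solutionLoop]
      rw [if_pos (hz M.toNat), if_pos le_rfl]
    · -- N > 0: no hit possible, full run stays positive; both "no"
      have hnohit : ∀ k : Nat, k < M.toNat → N ≠ (k : Int) * X := by
        intro k _ hEq
        have : (k : Int) * X ≤ 0 := mul_nonpos_of_nonneg_of_nonpos (by positivity) (le_of_lt hX)
        omega
      rw [loop_neg_run X hX M.toNat N _ _ 1 h0 h1 hnohit]
      have hMX : (((M.toNat : Nat)) : Int) * X ≤ 0 :=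
        mul_nonpos_of_nonneg_of_nonpos (by positivity) (le_of_lt hX)
      have hMX' : M * X ≤ 0 := mul_nonpos_of_nonneg_of_nonpos hpre (le_of_lt hX)
      rw [if_neg (by omega), if_neg (by omega), if_neg (by omega)]

theorem solution_changed : Claim_changed_solution := by unfold Claim_changed_solution; decide

theorem solution_tight : Claim_exact_solution := by
  intro N M X K S _ hpre hd
  unfold Pre_solution at hpre
  obtain ⟨hN, hX, hMX, hdvd⟩ := hd
  have h0 : (0 : Int) ≤ ((PySem.Str.count S "O" : Nat) : Int) := count_nonneg S "O"
  have h1 : (0 : Int) ≤ ((PySem.Str.count S "E" : Nat) : Int) := count_nonneg S "E"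
  -- A answers "no": the loop never lands on 0, runs all M months, ends positive
  have hnohit : ∀ k : Nat, k < M.toNat → N ≠ (k : Int) * X := by
    intro k _ hEq
    exact hdvd ⟨k, by linarith [hEq, mul_comm (k : Int) X]⟩
  have hAno : solution N M X K S = "no" := by
    rw [solution_eq, loop_neg_run X hX M.toNat N _ _ 1 h0 h1 hnohit]
    have hMc : ((M.toNat : Nat) : Int) = M := by omega
    rw [hMc, if_neg (by omega)]
  -- B answers "yes": the target is non-positive
  have hByes : solution_alt N M X K S = "yes" := by
    rw [solution_alt_eq, if_pos (le_of_lt hN)]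
  rw [hAno, hByes]
  decide
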